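-- pv_equiv track=rewrite | github.com/Chun-Bae/Baekjoon | Python/백준/Silver/5397. 키로거/키로거.py | solve_keylogger
-- ===== SOURCE A (Python) =====
-- from collections import deque
--
-- def solve_keylogger(test_cases):
--     results = []
--     for case in test_cases:
--         left_stack = deque()
--         right_stack = deque()
--
--         for char in case:
--             if char == '<':
--                 if left_stack:
--                     right_stack.appendleft(left_stack.pop())
--             elif char == '>':
--                 if right_stack:
--                     left_stack.append(right_stack.popleft())
--             elif char == '-':
--                 if left_stack:
--                     left_stack.pop()
--             else:
--                 left_stack.append(char)
--
--         results.append(''.join(left_stack) + ''.join(right_stack))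
--     return results
-- ===== SOURCE B (Python) =====
-- def solve_keylogger(test_cases):
--     results = []
--     for case in test_cases:
--         buf = []
--         pos = 0
--         for ch in case:
--             if ch == '<':
--                 if pos > 0:
--                     pos -= 1
--             elif ch == '>':
--                 if pos < len(buf):
--                     pos += 1
--             elif ch == '-':
--                 if pos > 0:
--                     buf = buf[:pos - 1] + buf[pos:]
--                     pos -= 1
--             else:
--                 buf = buf[:pos] + [ch] + buf[pos:]
--                 pos += 1
--         results.append(''.join(buf))
--     return results
-- ===== Notes on version B (the rewrite author's own statement) =====
-- stated objective: alternative
-- what changed: Replaces A's two-deque (left/right of cursor) simulation with a single buffer list plus an integer cursor position, performing inserts/deletes by slicing at the cursor index instead of shuttling characters between two stacks.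
import Mathlib
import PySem

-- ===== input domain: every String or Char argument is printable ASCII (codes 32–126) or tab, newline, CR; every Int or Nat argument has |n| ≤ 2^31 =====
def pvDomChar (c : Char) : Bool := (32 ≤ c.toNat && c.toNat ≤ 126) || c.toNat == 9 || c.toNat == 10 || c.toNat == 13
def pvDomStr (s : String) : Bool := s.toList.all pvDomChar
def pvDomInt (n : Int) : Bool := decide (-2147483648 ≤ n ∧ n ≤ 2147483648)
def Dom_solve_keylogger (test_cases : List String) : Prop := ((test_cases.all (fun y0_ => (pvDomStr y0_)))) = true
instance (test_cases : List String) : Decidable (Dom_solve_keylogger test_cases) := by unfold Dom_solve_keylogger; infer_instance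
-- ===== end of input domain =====

-- B replaces A's two cursor deques with one buffer list plus an integer cursor edited by slicing (alternative data structure, same cost class).

-- ===== PORT A =====
-- left_stack is kept head-first (head = char just left of the cursor), right_stack head-first
-- (head = char just right of the cursor); deque push/pop at the cursor ends are list cons/tail.
def pvStepA (st : List Char × List Char) (c : Char) : List Char × List Char :=
  match st with
  | (l, r) =>
    if c = '<' then
      match l with
      | [] => (l, r)
      | x :: l' => (l', x :: r)
    else if c = '>' then
      match r with
      | [] => (l, r)
      | x :: r' => (x :: l, r')
    else if c = '-' then
      match l with
      | [] => (l, r)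
      | _ :: l' => (l', r)
    else (c :: l, r)

def solve_keylogger (test_cases : List String) : List String :=
  test_cases.map (fun case =>
    match case.toList.foldl pvStepA ([], []) with
    | (l, r) => String.ofList (l.reverse ++ r))

-- ===== PORT B =====
-- single buffer plus cursor position; buf[:i] / buf[i:] are List.take / List.drop (i is a
-- nonnegative in-range index throughout, where Python slicing coincides with take/drop).
def pvStepB (st : List Char × Nat) (c : Char) : List Char × Nat :=
  match st with
  | (buf, pos) =>
    if c = '<' then
      (buf, if pos > 0 then pos - 1 else pos)
    else if c = '>' then
      (buf, if pos < buf.length then pos + 1 else pos)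
    else if c = '-' then
      if pos > 0 then (buf.take (pos - 1) ++ buf.drop pos, pos - 1) else (buf, pos)
    else (buf.take pos ++ [c] ++ buf.drop pos, pos + 1)

def solve_keylogger_alt (test_cases : List String) : List String :=
  test_cases.map (fun case =>
    match case.toList.foldl pvStepB ([], 0) with
    | (buf, _) => String.ofList buf)

-- ===== PRECONDITION & SPEC =====
def Spec_solve_keylogger (test_cases : List String) (out : List String) : Prop := out = solve_keylogger_alt test_cases
instance (test_cases : List String) (out : List String) : Decidable (Spec_solve_keylogger test_cases out) := by unfold Spec_solve_keylogger; infer_instance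

-- ===== CLAIM (what is proved, stated in full; the proofs are below) =====
def Claim_equal_solve_keylogger : Prop := ∀ (test_cases : List String), Dom_solve_keylogger test_cases → Spec_solve_keylogger test_cases (solve_keylogger test_cases)

-- ===== LEMMAS AND PROOFS =====

-- Invariant: B's state (buf, pos) corresponds to A's state (l, r) via buf = l.reverse ++ r, pos = l.length.
theorem pvStep_sim (c : Char) (l r : List Char) :
    pvStepB (l.reverse ++ r, l.length) c
      = ((pvStepA (l, r) c).1.reverse ++ (pvStepA (l, r) c).2, (pvStepA (l, r) c).1.length) := by
  by_cases h1 : c = '<'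
  · cases l with
    | nil => simp [pvStepA, pvStepB, h1]
    | cons x l' => simp [pvStepA, pvStepB, h1]
  · by_cases h2 : c = '>'
    · cases r with
      | nil => simp [pvStepA, pvStepB, h2]
      | cons x r' => simp [pvStepA, pvStepB, h2]
    · by_cases h3 : c = '-'
      · cases l with
        | nil => simp [pvStepA, pvStepB, h3]
        | cons x l' =>
          simp [pvStepA, pvStepB, h3, List.drop_append, List.append_assoc]
      · simp [pvStepA, pvStepB, h1, h2, h3]

theorem pvFold_sim (cs : List Char) (l r : List Char) :
    cs.foldl pvStepB (l.reverse ++ r, l.length)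
      = ((cs.foldl pvStepA (l, r)).1.reverse ++ (cs.foldl pvStepA (l, r)).2,
         (cs.foldl pvStepA (l, r)).1.length) := by
  induction cs generalizing l r with
  | nil => simp
  | cons c cs ih =>
    simp only [List.foldl_cons, pvStep_sim]
    exact ih (pvStepA (l, r) c).1 (pvStepA (l, r) c).2

-- ===== VERDICT (by name: the statement is the Claim_ definition above) =====
theorem solve_keylogger_spec : Claim_equal_solve_keylogger := by
  intro test_cases _
  unfold Spec_solve_keylogger solve_keylogger solve_keylogger_alt
  refine List.map_congr_left (fun case _ => ?_)
  have h := pvFold_sim case.toList [] []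
  simp only [List.reverse_nil, List.nil_append, List.length_nil] at h
  rw [h]
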